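-- pv_equiv track=rewrite | github.com/stefantaubert/pinyin-to-ipa | src/pinyin_to_ipa/ipa2symb.py | merge_fusion_with_ignore
-- ===== SOURCE A (Python) =====
-- from typing import Optional, Set, Tuple
--
-- def merge_fusion_with_ignore(symbols: Tuple[str, ...], fusion_symbols: Set[str], ignore: Set[str]) -> Tuple[str, ...]:
--   aux_symbols = list(symbols)
--   fused_symbols = []
--   while len(aux_symbols) != 0:
--     next_fused_symbols, processed_index = get_next_fused_symbols_and_index(
--       aux_symbols, fusion_symbols, ignore)
--     fused_symbols.append(next_fused_symbols)
--     del aux_symbols[:processed_index + 1]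
--   return tuple(fused_symbols)
--
-- def get_next_fused_symbols_and_index(symbols: Tuple[str, ...], fusion_symbols: Set[str], ignore: Set[str]) -> Tuple[str, int]:
--   first_symbol_without_ignore_symbols = strip_off_ignore(symbols[0], ignore)
--   if first_symbol_without_ignore_symbols not in fusion_symbols:
--     return symbols[0], 0
--   fused_fusion_symbols, processed_index = get_next_consecutive_fusion_symbols_and_index(
--     symbols, fusion_symbols, ignore)
--   return fused_fusion_symbols, processed_index
--
-- def get_next_consecutive_fusion_symbols_and_index(symbols: Tuple[str, ...], fusion_symbols: Set[str], ignore: Set[str]) -> Tuple[str, int]: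
--   assert strip_off_ignore(symbols[0], ignore) in fusion_symbols
--   consecutive_fusion_symbols = symbols[0]
--   processed_index = 0
--   for symbol in symbols[1:]:
--     symbol_without_ignore = strip_off_ignore(symbol, ignore)
--     if symbol_without_ignore in fusion_symbols:
--       consecutive_fusion_symbols += symbol
--       processed_index += 1
--     else:
--       break
--   return consecutive_fusion_symbols, processed_index
--
-- def strip_off_ignore(symbol: str, ignore: Set[str]) -> str:
--   for ignore_symbol in ignore:
--     symbol = symbol.replace(ignore_symbol, "")
--   return symbol
-- ===== SOURCE B (Python) =====
-- def merge_fusion_with_ignore(symbols, fusion_symbols, ignore):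
--   fusion_set = set(fusion_symbols)
--   out = []
--   buf = []  # pending run of fusion symbols
--   for s in symbols:
--     t = s
--     for ig in ignore:
--       t = t.replace(ig, "")
--     if t in fusion_set:
--       buf.append(s)
--     else:
--       if buf:
--         out.append("".join(buf))
--         buf = []
--       out.append(s)
--   if buf:
--     out.append("".join(buf))
--   return tuple(out)
-- ===== Notes on version B (the rewrite author's own statement) =====
-- stated objective: alternative
-- what changed: Replaced the while-loop that repeatedly copies the tail (symbols[1:]) and deletes prefixes of a working copy (del aux[:i+1]) with a single forward pass over the symbols holding a pending-run buffer that is joined once per run, with set membership for the fusion test; it trades A's destructive worklist for an accumulator fold.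
import Mathlib
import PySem

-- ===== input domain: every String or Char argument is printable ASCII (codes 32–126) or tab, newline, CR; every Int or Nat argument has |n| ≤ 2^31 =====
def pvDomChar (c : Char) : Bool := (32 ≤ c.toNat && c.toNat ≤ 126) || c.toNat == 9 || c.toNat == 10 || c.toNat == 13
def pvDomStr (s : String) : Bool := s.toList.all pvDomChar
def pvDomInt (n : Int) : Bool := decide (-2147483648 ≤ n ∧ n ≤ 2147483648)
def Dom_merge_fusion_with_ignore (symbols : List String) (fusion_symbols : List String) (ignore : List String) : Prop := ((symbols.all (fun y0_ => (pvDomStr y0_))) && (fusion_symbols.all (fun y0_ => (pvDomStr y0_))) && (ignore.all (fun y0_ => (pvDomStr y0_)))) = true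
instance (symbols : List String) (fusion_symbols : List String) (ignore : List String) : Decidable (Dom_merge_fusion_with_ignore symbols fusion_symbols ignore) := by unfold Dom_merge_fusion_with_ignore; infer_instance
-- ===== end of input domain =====

-- B replaces A's repeated prefix-deletion while-loop by one forward pass with a pending-run
-- buffer joined once per run (objective: alternative — no list slicing/deletion).
-- Python sets (fusion_symbols, ignore) are modelled as lists of their distinct elements in
-- iteration order; strip_off_ignore applies the replacements in that order, as in Python.

-- ===== PORT A =====
-- strip_off_ignore
def pvStripOff (symbol : String) (ignore : List String) : String :=
  ignore.foldl (fun s ig => PySem.Str.replace s ig "") symbol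

-- the for-loop of get_next_consecutive_fusion_symbols_and_index (break = return current state)
def pvConsecLoop (fus ign : List String) : List String → String → Nat → String × Nat
  | [], acc, idx => (acc, idx)
  | s :: t, acc, idx =>
      if pvStripOff s ign ∈ fus then pvConsecLoop fus ign t (acc ++ s) (idx + 1)
      else (acc, idx)

-- get_next_fused_symbols_and_index on the nonempty list hd :: tl
def pvNext (fus ign : List String) (hd : String) (tl : List String) : String × Nat :=
  if pvStripOff hd ign ∈ fus then pvConsecLoop fus ign tl hd 0 else (hd, 0)

-- the while-loop of merge_fusion_with_ignore; `del aux[:i+1]` is `drop (i+1)`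
def pvAGo (fus ign : List String) : List String → List String
  | [] => []
  | s :: t =>
      let p := pvNext fus ign s t
      p.1 :: pvAGo fus ign (t.drop p.2)
termination_by l => l.length
decreasing_by simp

def merge_fusion_with_ignore (symbols : List String) (fusion_symbols : List String) (ignore : List String) : List String :=
  pvAGo fusion_symbols ignore symbols

-- ===== PORT B =====
-- loop body of Source B: state = (out, buf); buf = pending run of fusion symbols (list, joined on flush)
def pvBStep (fusSet : PySem.Set String) (ign : List String) (st : List String × List String) (s : String) : List String × List String :=
  if pvStripOff s ign ∈ fusSet then
    (st.1, st.2 ++ [s])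
  else
    if st.2 = [] then (st.1 ++ [s], [])
    else (st.1 ++ [String.join st.2, s], [])

def merge_fusion_with_ignore_alt (symbols : List String) (fusion_symbols : List String) (ignore : List String) : List String :=
  let fusionSet := PySem.Set.ofList fusion_symbols
  let st := symbols.foldl (pvBStep fusionSet ignore) ([], [])
  if st.2 = [] then st.1 else st.1 ++ [String.join st.2]

-- ===== PRECONDITION & SPEC =====
def Spec_merge_fusion_with_ignore (symbols : List String) (fusion_symbols : List String) (ignore : List String) (out : List String) : Prop := out = merge_fusion_with_ignore_alt symbols fusion_symbols ignore
instance (symbols : List String) (fusion_symbols : List String) (ignore : List String) (out : List String) : Decidable (Spec_merge_fusion_with_ignore symbols fusion_symbols ignore out) := by unfold Spec_merge_fusion_with_ignore; infer_instance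

-- ===== CLAIM (what is proved, stated in full; the proofs are below) =====
def Claim_equal_merge_fusion_with_ignore : Prop := ∀ (symbols : List String) (fusion_symbols : List String) (ignore : List String), Dom_merge_fusion_with_ignore symbols fusion_symbols ignore → Spec_merge_fusion_with_ignore symbols fusion_symbols ignore (merge_fusion_with_ignore symbols fusion_symbols ignore)

-- ===== LEMMAS AND PROOFS =====

-- A's inner loop computes the left fold of the takeWhile prefix and its length
theorem pvConsecLoop_eq (fus ign : List String) (t : List String) (acc : String) (idx : Nat) :
    pvConsecLoop fus ign t acc idx =
      ((t.takeWhile (fun s => decide (pvStripOff s ign ∈ fus))).foldl (· ++ ·) acc,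
        idx + (t.takeWhile (fun s => decide (pvStripOff s ign ∈ fus))).length) := by
  induction t generalizing acc idx with
  | nil => simp [pvConsecLoop]
  | cons s t ih =>
      by_cases h : pvStripOff s ign ∈ fus <;>
        simp [pvConsecLoop, h, ih, Nat.add_assoc, Nat.add_comm 1]

theorem drop_length_takeWhile {α} (p : α → Bool) (t : List α) :
    t.drop (t.takeWhile p).length = t.dropWhile p := by
  induction t with
  | nil => rfl
  | cons s t ih =>
      by_cases h : p s <;> simp [h, ih]

theorem pvAGo_nil (fus ign : List String) : pvAGo fus ign [] = [] := by
  rw [pvAGo.eq_def]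

-- characterization of A's outer loop on a cons cell
theorem pvAGo_cons (fus ign : List String) (s : String) (t : List String) :
    pvAGo fus ign (s :: t) =
      if pvStripOff s ign ∈ fus then
        ((t.takeWhile (fun x => decide (pvStripOff x ign ∈ fus))).foldl (· ++ ·) s)
          :: pvAGo fus ign (t.dropWhile (fun x => decide (pvStripOff x ign ∈ fus)))
      else s :: pvAGo fus ign t := by
  rw [pvAGo.eq_def]
  by_cases h : pvStripOff s ign ∈ fus <;>
    simp [pvNext, h, pvConsecLoop_eq, drop_length_takeWhile]

-- B's fold from any state carries the already-produced output as a prefix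
theorem pvB_fold_out (fus ign : List String) (l : List String) (out : List String) (buf : List String) :
    l.foldl (pvBStep fus ign) (out, buf) =
      (out ++ (l.foldl (pvBStep fus ign) ([], buf)).1,
        (l.foldl (pvBStep fus ign) ([], buf)).2) := by
  induction l generalizing out buf with
  | nil => simp
  | cons s t ih =>
      have hstep : ∀ o : List String, pvBStep fus ign (o, buf) s =
          (o ++ (pvBStep fus ign ([], buf) s).1, (pvBStep fus ign ([], buf) s).2) := by
        intro o
        by_cases h : pvStripOff s ign ∈ fus <;> by_cases hb : buf = [] <;>
          simp [pvBStep, h, hb]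
      simp only [List.foldl_cons]
      rw [hstep out]
      generalize pvBStep fus ign ([], buf) s = P
      obtain ⟨X, b'⟩ := P
      rw [ih (out ++ X) b', ih X b']
      simp

def pvFlush (st : List String × List String) : List String :=
  if st.2 = [] then st.1 else st.1 ++ [String.join st.2]

theorem pvFlush_append (a : List String) (st : List String × List String) :
    pvFlush (a ++ st.1, st.2) = a ++ pvFlush st := by
  obtain ⟨x, o⟩ := st
  by_cases hb : o = [] <;> simp [pvFlush, hb]

theorem join_append_one (l : List String) (s : String) :
    String.join (l ++ [s]) = String.join l ++ s := by
  simp [String.join, List.foldl_append]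

theorem join_singleton (s : String) : String.join [s] = s := by
  simp [String.join]

-- B with an open run `buf` merges the takeWhile prefix into its join, then proceeds like A
theorem pvB_some (fus ign : List String) (l : List String) :
    (∀ buf : List String, buf ≠ [] →
      pvFlush (l.foldl (pvBStep (PySem.Set.ofList fus) ign) ([], buf)) =
        ((l.takeWhile (fun x => decide (pvStripOff x ign ∈ fus))).foldl (· ++ ·) (String.join buf))
          :: pvAGo fus ign (l.dropWhile (fun x => decide (pvStripOff x ign ∈ fus)))) ∧
    pvFlush (l.foldl (pvBStep (PySem.Set.ofList fus) ign) ([], [])) = pvAGo fus ign l := by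
  induction l with
  | nil => exact ⟨fun buf hb => by simp [pvFlush, hb, pvAGo_nil], by simp [pvFlush, pvAGo_nil]⟩
  | cons s t ih =>
      have key : ∀ o : List String,
          pvFlush (t.foldl (pvBStep (PySem.Set.ofList fus) ign) (o, [])) = o ++ pvAGo fus ign t := by
        intro o
        rw [pvB_fold_out, pvFlush_append, ih.2]
      by_cases h : pvStripOff s ign ∈ fus
      · constructor
        · intro buf hb
          have := ih.1 (buf ++ [s]) (by simp)
          simp [pvBStep, PySem.Set.mem_ofList, h, this, join_append_one]
        · have := ih.1 [s] (by simp)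
          simp [pvBStep, PySem.Set.mem_ofList, h, pvAGo_cons, this, join_singleton]
      · constructor
        · intro buf hb
          simp only [List.foldl_cons, pvBStep, PySem.Set.mem_ofList, h, if_false, hb]
          rw [key ([] ++ [String.join buf, s])]
          simp [pvAGo_cons, h]
        · simp only [List.foldl_cons, pvBStep, PySem.Set.mem_ofList, h, if_false, if_true]
          rw [key ([] ++ [s])]
          simp [pvAGo_cons, h]

-- ===== VERDICT (by name: the statement is the Claim_ definition above) =====
theorem merge_fusion_with_ignore_spec : Claim_equal_merge_fusion_with_ignore := by
  intro symbols fus ign _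
  unfold Spec_merge_fusion_with_ignore merge_fusion_with_ignore merge_fusion_with_ignore_alt
  exact ((pvB_some fus ign symbols).2).symm
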